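-- pv_equiv track=rewrite | github.com/rdehaan/justifier | justifier.py | nondominated_outcomes
-- ===== SOURCE A (Python) =====
-- def nondominated_outcomes(profile, candidates):
--     outcomes = set()
--     for candidate1 in candidates:
--         dominated = False
--         for candidate2 in candidates:
--             if candidate1 != candidate2:
--                 dominates = True
--                 for vote in profile:
--                     index2 = vote.index(candidate2)
--                     index1 = vote.index(candidate1)
--                     dominates_in_vote = index2 < index1
--                     if not dominates_in_vote:
--                         dominates = False
--                 if dominates:
--                     dominated = True
--         if not dominated:
--             outcomes.add(candidate1)
--     return outcomes
-- ===== SOURCE B (Python) =====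
-- def nondominated_outcomes(profile, candidates):
--     cand_set = set(candidates)
--     outcomes = set()
--     for c in candidates:
--         dominators = cand_set - {c}
--         for vote in profile:
--             if not dominators:
--                 break
--             dominators &= set(vote[:vote.index(c)])
--         if not dominators:
--             outcomes.add(c)
--     return outcomes
-- ===== Notes on version B (the rewrite author's own statement) =====
-- stated objective: faster
-- what changed: Instead of testing every ordered pair of candidates with a full pass over the profile per pair, B keeps for each candidate a single set of surviving dominators, intersecting it with the set of candidates ranked ahead in each vote (stopping once empty); the candidate is nondominated iff the set ends empty.
import Mathlib
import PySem

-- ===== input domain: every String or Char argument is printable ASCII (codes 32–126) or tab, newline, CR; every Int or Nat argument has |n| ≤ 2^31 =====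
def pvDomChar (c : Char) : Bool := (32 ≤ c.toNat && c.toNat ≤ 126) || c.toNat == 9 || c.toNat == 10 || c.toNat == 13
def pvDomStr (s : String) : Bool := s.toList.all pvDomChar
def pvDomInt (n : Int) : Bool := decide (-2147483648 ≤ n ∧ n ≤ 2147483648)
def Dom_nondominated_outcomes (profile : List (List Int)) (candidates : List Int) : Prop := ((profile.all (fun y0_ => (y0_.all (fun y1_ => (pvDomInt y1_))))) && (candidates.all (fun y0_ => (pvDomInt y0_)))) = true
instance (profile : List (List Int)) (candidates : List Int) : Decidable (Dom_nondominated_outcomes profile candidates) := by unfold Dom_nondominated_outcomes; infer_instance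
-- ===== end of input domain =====

-- B replaces A's pairwise-domination test (a full pass over the profile per ordered
-- candidate pair) by one shrinking dominator set per candidate, intersected vote by vote:
-- asymptotically fewer index scans (objective: faster).

-- ===== PORT A =====
-- 'dominates' inner loop of A: for vote in profile, dominates &= (vote.index(c2) < vote.index(c1))
def aDominates (profile : List (List Int)) (c1 c2 : Int) : Bool :=
  profile.foldl (fun dominates vote =>
    match PySem.List.index? vote c2, PySem.List.index? vote c1 with
    | some index2, some index1 => if ¬ (index2 < index1) then false else dominates
    | _, _ => dominates   -- vote.index raises ValueError here; such inputs are outside Pre_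
    ) true

-- 'dominated' middle loop of A over candidate2
def aDominated (profile : List (List Int)) (candidates : List Int) (c1 : Int) : Bool :=
  candidates.foldl (fun dominated c2 =>
    if c1 ≠ c2 then (if aDominates profile c1 c2 then true else dominated) else dominated)
    false

def nondominated_outcomes (profile : List (List Int)) (candidates : List Int) : List Int :=
  candidates.foldl (fun outcomes c1 =>
    if ¬ aDominated profile candidates c1 then PySem.Set.add outcomes c1 else outcomes)
    PySem.Set.empty

-- ===== PORT B =====
-- B's inner loop: dominators = cand_set - {c}; for vote: break when empty, else
-- dominators &= set(vote[:vote.index(c)])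
def bDominators (profile : List (List Int)) (candidates : List Int) (c : Int) : List Int :=
  profile.foldl (fun doms vote =>
    if doms.isEmpty then doms          -- 'break' once no dominators remain
    else match PySem.List.index? vote c with
      | some i => PySem.Set.inter doms (vote.take i)
      | none => doms                   -- vote.index raises ValueError here; outside Pre_
    ) (PySem.Set.diff (PySem.Set.ofList candidates) [c])

def nondominated_outcomes_alt (profile : List (List Int)) (candidates : List Int) : List Int :=
  candidates.foldl (fun outcomes c =>
    if (bDominators profile candidates c).isEmpty then PySem.Set.add outcomes c else outcomes)
    PySem.Set.empty

-- ===== PRECONDITION & SPEC =====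
-- Pre_ excludes exactly the inputs where A raises ValueError: with at least two distinct
-- candidates and a nonempty profile, A calls vote.index on every candidate in every vote,
-- so every candidate must occur in every vote (with ≤ 1 distinct candidate A never indexes).
def Pre_nondominated_outcomes (profile : List (List Int)) (candidates : List Int) : Prop :=
  (∀ c ∈ candidates, ∀ vote ∈ profile, c ∈ vote) ∨ (∀ a ∈ candidates, ∀ b ∈ candidates, a = b)
instance (profile : List (List Int)) (candidates : List Int) : Decidable (Pre_nondominated_outcomes profile candidates) := by unfold Pre_nondominated_outcomes; infer_instance
def pvWitness_nondominated_outcomes : List (List Int) × List Int := ([[1, 2, 3], [2, 1, 3]], [1, 2, 3])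

def Spec_nondominated_outcomes (profile : List (List Int)) (candidates : List Int) (out : List Int) : Prop := out = nondominated_outcomes_alt profile candidates
instance (profile : List (List Int)) (candidates : List Int) (out : List Int) : Decidable (Spec_nondominated_outcomes profile candidates out) := by unfold Spec_nondominated_outcomes; infer_instance

-- ===== CLAIM (what is proved, stated in full; the proofs are below) =====
def Claim_equal_nondominated_outcomes : Prop := ∀ (profile : List (List Int)) (candidates : List Int), Dom_nondominated_outcomes profile candidates → Pre_nondominated_outcomes profile candidates → Spec_nondominated_outcomes profile candidates (nondominated_outcomes profile candidates)

-- ===== LEMMAS AND PROOFS =====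

-- A's innermost loop as a Bool 'all' over the profile
theorem aDominates_eq (profile : List (List Int)) (c1 c2 : Int) (b : Bool)
    (h : ∀ v ∈ profile, c1 ∈ v ∧ c2 ∈ v) :
    profile.foldl (fun dominates vote =>
      match PySem.List.index? vote c2, PySem.List.index? vote c1 with
      | some index2, some index1 => if ¬ (index2 < index1) then false else dominates
      | _, _ => dominates) b
    = (b && profile.all (fun v =>
        decide ((PySem.List.index? v c2).getD 0 < (PySem.List.index? v c1).getD 0))) := by
  induction profile generalizing b with
  | nil => simp
  | cons v vs ih =>
    obtain ⟨h1, h2⟩ := h v (by simp)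
    obtain ⟨i1, hi1⟩ := Option.isSome_iff_exists.mp ((PySem.List.index?_isSome_iff v c1).mpr h1)
    obtain ⟨i2, hi2⟩ := Option.isSome_iff_exists.mp ((PySem.List.index?_isSome_iff v c2).mpr h2)
    have step : ∀ x ∈ vs, c1 ∈ x ∧ c2 ∈ x := fun x hx => h x (by simp [hx])
    simp only [List.foldl_cons, ih _ step, List.all_cons, hi1, hi2]
    by_cases hlt : i2 < i1 <;> simp [hlt]

-- A's middle loop as a Bool 'any' over the candidates
theorem aDominated_eq (profile : List (List Int)) (l : List Int) (c1 : Int) (b : Bool) :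
    l.foldl (fun dominated c2 =>
      if c1 ≠ c2 then (if aDominates profile c1 c2 then true else dominated) else dominated) b
    = (b || l.any (fun c2 => decide (c1 ≠ c2) && aDominates profile c1 c2)) := by
  induction l generalizing b with
  | nil => simp
  | cons c2 cs ih =>
    simp only [List.foldl_cons, List.any_cons, ih]
    by_cases hne : c1 ≠ c2 <;> by_cases hd : aDominates profile c1 c2 = true <;>
      simp [hne, hd]

-- first-occurrence index versus membership in a prefix
theorem mem_take_iff_index (v : List Int) (x : Int) (k i : Nat)
    (hk : PySem.List.index? v x = some k) :
    x ∈ v.take i ↔ k < i := by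
  obtain ⟨hklt, hvk, hmin⟩ := PySem.List.getElem_of_index?_eq_some hk
  constructor
  · intro hmem
    obtain ⟨j, hj, hvj⟩ := List.mem_iff_getElem.mp hmem
    have hj' : j < i := by
      have := hj; simp [List.length_take] at this; omega
    have hjlen : j < v.length := by
      have := hj; simp [List.length_take] at this; omega
    have hvj' : v[j] = x := by
      have := hvj; rwa [List.getElem_take] at this
    by_cases hjk : j < k
    · exact absurd hvj' (hmin j hjk)
    · omega
  · intro hki
    have : (v.take i)[k]'(by simp [List.length_take]; omega) = x := by
      rw [List.getElem_take]; exact hvk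
    exact this ▸ List.getElem_mem _

-- B's vote loop only shrinks the dominator set
theorem bFold_subset (profile : List (List Int)) (c x : Int) (doms : List Int)
    (hmem : x ∈ profile.foldl (fun doms vote =>
      if doms.isEmpty then doms
      else match PySem.List.index? vote c with
        | some i => PySem.Set.inter doms (vote.take i)
        | none => doms) doms) : x ∈ doms := by
  induction profile generalizing doms with
  | nil => simpa using hmem
  | cons v vs ih =>
    simp only [List.foldl_cons] at hmem
    have := ih _ hmem
    by_cases hE : doms.isEmpty
    · simpa [hE] using this
    · simp only [hE] at this
      cases hidx : PySem.List.index? v c with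
      | none =>
        rw [hidx] at this
        exact this
      | some i =>
        rw [hidx] at this
        exact ((PySem.Set.mem_inter _ _ _).mp this).1

-- membership in B's dominator set after the vote loop
theorem bFold_mem (profile : List (List Int)) (c x : Int) (doms : List Int)
    (hc : ∀ v ∈ profile, c ∈ v) (hx : ∀ v ∈ profile, x ∈ v) :
    (x ∈ profile.foldl (fun doms vote =>
      if doms.isEmpty then doms
      else match PySem.List.index? vote c with
        | some i => PySem.Set.inter doms (vote.take i)
        | none => doms) doms)
    ↔ x ∈ doms ∧ ∀ v ∈ profile,
        (PySem.List.index? v x).getD 0 < (PySem.List.index? v c).getD 0 := by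
  induction profile generalizing doms with
  | nil => simp
  | cons v vs ih =>
    have hcv : c ∈ v := hc v (by simp)
    have hxv : x ∈ v := hx v (by simp)
    obtain ⟨ic, hic⟩ := Option.isSome_iff_exists.mp ((PySem.List.index?_isSome_iff v c).mpr hcv)
    obtain ⟨ix, hix⟩ := Option.isSome_iff_exists.mp ((PySem.List.index?_isSome_iff v x).mpr hxv)
    have hc' : ∀ u ∈ vs, c ∈ u := fun u hu => hc u (by simp [hu])
    have hx' : ∀ u ∈ vs, x ∈ u := fun u hu => hx u (by simp [hu])
    simp only [List.foldl_cons]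
    by_cases hE : doms.isEmpty
    · have hnil : doms = [] := by simpa [List.isEmpty_iff] using hE
      subst hnil
      simp only [hE]
      rw [ih _ hc' hx']
      simp
    · simp only [hE, Bool.false_eq_true, if_false, hic]
      -- reduce the match on 'some ic'
      rw [ih _ hc' hx']
      rw [PySem.Set.mem_inter _ _ _, mem_take_iff_index v x ix ic hix]
      simp only [List.mem_cons]
      constructor
      · rintro ⟨⟨hd, hlt⟩, hall⟩
        refine ⟨hd, ?_⟩
        intro u hu
        rcases hu with hu | hu
        · subst hu
          rw [PySem.List.index?_eq_idxOf?] at hix hic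
          simp [hix, hic, hlt]
        · exact hall u hu
      · rintro ⟨hd, hall⟩
        have hlt := hall v (Or.inl rfl)
        simp only [hix, hic, Option.getD_some] at hlt
        exact ⟨⟨hd, hlt⟩, fun u hu => hall u (Or.inr hu)⟩

-- per-candidate agreement of the two tests
theorem key_lemma (profile : List (List Int)) (candidates : List Int) (c : Int)
    (hpre : Pre_nondominated_outcomes profile candidates) (hc : c ∈ candidates) :
    aDominated profile candidates c = !(bDominators profile candidates c).isEmpty := by
  rcases hpre with hall | heq
  · -- every candidate occurs in every vote
    rw [Bool.eq_iff_iff]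
    unfold aDominated bDominators
    rw [aDominated_eq]
    simp only [Bool.false_or, List.any_eq_true, Bool.and_eq_true, decide_eq_true_eq,
      Bool.not_eq_true', List.isEmpty_eq_false_iff_exists_mem]
    constructor
    · rintro ⟨c2, hc2, hne, hdom⟩
      refine ⟨c2, ?_⟩
      rw [bFold_mem profile c c2 _ (fun v hv => hall c hc v hv) (fun v hv => hall c2 hc2 v hv)]
      refine ⟨?_, ?_⟩
      · rw [PySem.Set.mem_diff _ _ _]
        refine ⟨(PySem.Set.mem_ofList _ _).mpr hc2, by simp [Ne.symm hne]⟩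
      · intro v hv
        unfold aDominates at hdom
        rw [aDominates_eq profile c c2 true
          (fun u hu => ⟨hall c hc u hu, hall c2 hc2 u hu⟩)] at hdom
        simp only [Bool.true_and, List.all_eq_true, decide_eq_true_eq] at hdom
        exact hdom v hv
    · rintro ⟨x, hx⟩
      have hx0 : x ∈ PySem.Set.diff (PySem.Set.ofList candidates) [c] := bFold_subset profile c x _ hx
      rw [PySem.Set.mem_diff _ _ _, PySem.Set.mem_ofList _ _] at hx0
      obtain ⟨hxc, hxne⟩ := hx0
      have hxne' : x ≠ c := by simpa using hxne
      rw [bFold_mem profile c x _ (fun v hv => hall c hc v hv) (fun v hv => hall x hxc v hv)] at hx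
      refine ⟨x, hxc, Ne.symm hxne', ?_⟩
      unfold aDominates
      rw [aDominates_eq profile c x true (fun u hu => ⟨hall c hc u hu, hall x hxc u hu⟩)]
      simp only [Bool.true_and, List.all_eq_true, decide_eq_true_eq]
      exact hx.2
  · -- at most one distinct candidate: both sides say "not dominated"
    have hA : aDominated profile candidates c = false := by
      unfold aDominated
      rw [aDominated_eq]
      simp only [Bool.false_or, List.any_eq_false]
      intro c2 hc2
      simp [heq c hc c2 hc2]
    have hinit : PySem.Set.diff (PySem.Set.ofList candidates) [c] = [] := by
      rw [List.eq_nil_iff_forall_not_mem]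
      intro x hx
      rw [PySem.Set.mem_diff _ _ _, PySem.Set.mem_ofList _ _] at hx
      have hxne : x ≠ c := by simpa using hx.2
      exact hxne (heq x hx.1 c hc)
    have hB : bDominators profile candidates c = [] := by
      unfold bDominators
      rw [hinit, List.eq_nil_iff_forall_not_mem]
      intro x hx
      simpa using bFold_subset profile c x [] hx
    rw [hA, hB]
    rfl

-- ===== VERDICT (by name: the statement is the Claim_ definition above) =====
theorem nondominated_outcomes_spec : Claim_equal_nondominated_outcomes := by
  intro profile candidates _ hpre
  unfold Spec_nondominated_outcomes nondominated_outcomes nondominated_outcomes_alt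
  apply PySem.List.foldl_congr_mem'
  intro c hc acc
  rw [key_lemma profile candidates c hpre hc]
  cases hE : (bDominators profile candidates c).isEmpty <;> simp
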